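/- GENERATED by mk_final_copies.py from the proof of the farm's unit `start_decoder.5` (farm:start_decoder.5.2: Proof.lean) as the
   re-elaboration sweep compiled it — do not edit. -/
import Vorbis.Spec.Worked.start_decoder_5_Lemmas
import Vorbis.Spec.Units.start_decoder_5

open X86 X86.User Asan Vorbis Vorbis.Spec Vorbis.Spec.StartDecoder

/-- **Unit `start_decoder.5`** (0x113e51 … 0x113ef9, stb_vorbis_fixed.c:3676 – 3681: the six header bytes of the comment packet,
`vorbis_validate`, `len = get32_packet(f)`, FIX 1, `f->vendor = setup_malloc(f, len + 1)`): `seg5_of_failfix` (Lemmas.lean) with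
the missing fact `FailFix` supplied by the callee's contract itself — the last conjunct of the failure clause of
`setup_malloc.spec` (freeze-9: a refused request wrote nothing but its 80 bytes of stack and `[f + 8, f + 12)`), weakened to the
three windows `FailFix` names. -/
theorem Vorbis.Spec.Worked.start_decoder_5_ok : Vorbis.Spec.start_decoder_5.Statement := by
  intro Lay hLay μ hμ u₀ hcode h_get8_packet h_asan_store1_noabort h_vorbis_validate h_get32_packet h_setup_malloc
    h_asan_store8_noabort h_error
  refine Vorbis.Spec.start_decoder_5.seg5_of_failfix Lay hLay μ hμ u₀ hcode h_get8_packet h_asan_store1_noabort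
    h_vorbis_validate h_get32_packet h_setup_malloc h_asan_store8_noabort h_error ?_
  intro g A u w hpost _ hnofit
  -- the callee's own statement of what a failed call wrote
  have hfail := (hpost.2 hnofit).2.2.2
  -- its two windows are the first two of the three that `FailFix` allows
  refine hfail.mono ?_
  intro s hs a h1 h2
  refine ⟨s, ?_, h1, h2⟩
  rcases List.mem_cons.mp hs with rfl | hs
  · exact List.mem_cons_self
  · rw [List.mem_singleton.mp hs]
    exact List.mem_cons_of_mem _ List.mem_cons_self
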